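-- pv_equiv track=rewrite | github.com/bornkesselpascal/university | python/gdp-python/Übungen/Blatt 7/c.py | dreifachkonsonanten
-- ===== SOURCE A (Python) =====
-- def dreifachkonsonanten(satz):
--     results = []
--
--     i = 0
--     while i < len(satz):
--         j = i
--         while j < (len(satz)-1) and satz[j]==satz[j+1]:
--             j+=1
--
--         if j-i >= 2:
--             if satz[j-1] not in 'aeiou':
--                 results.append(satz[j])
--
--         i=j+1
--
--     return sorted(results)
-- ===== SOURCE B (Python) =====
-- def dreifachkonsonanten(satz):
--     # single pass with a run counter instead of a nested two-pointer scan
--     results = []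
--     prev = None
--     run = 0
--     for ch in satz:
--         if ch == prev:
--             run += 1
--         else:
--             if run >= 3 and prev not in 'aeiou':
--                 results.append(prev)
--             prev = ch
--             run = 1
--     if run >= 3 and prev not in 'aeiou':
--         results.append(prev)
--     return sorted(results)
-- ===== Notes on version B (the rewrite author's own statement) =====
-- stated objective: simpler
-- what changed: Replaces A's nested two-pointer index scan (inner while advancing j over each run) by a single for-loop over the characters maintaining a run counter, flushing a completed run when the character changes.
import Mathlib
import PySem

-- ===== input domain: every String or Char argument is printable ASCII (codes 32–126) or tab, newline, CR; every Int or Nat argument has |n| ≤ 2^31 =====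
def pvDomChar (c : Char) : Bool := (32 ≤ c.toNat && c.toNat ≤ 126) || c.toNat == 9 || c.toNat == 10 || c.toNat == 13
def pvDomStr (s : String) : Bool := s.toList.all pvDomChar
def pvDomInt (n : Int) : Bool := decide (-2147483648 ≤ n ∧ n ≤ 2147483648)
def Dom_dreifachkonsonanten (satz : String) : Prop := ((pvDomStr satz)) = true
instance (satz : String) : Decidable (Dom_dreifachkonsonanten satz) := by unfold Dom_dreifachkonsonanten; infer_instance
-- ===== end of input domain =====

-- B replaces A's nested two-pointer index scan by one pass with a run counter (objective: simpler).

-- ===== PORT A =====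
-- inner while loop: `while j < (len(satz)-1) and satz[j]==satz[j+1]: j+=1`
-- (fuel = len(satz) only makes the recursion structural; it never cuts the loop short,
-- since the loop makes at most len(satz)-1-j steps)
def pvInnerA (s : List Char) : Nat → Nat → Nat
  | 0, j => j
  | fuel+1, j => if j < s.length - 1 ∧ s[j]? = s[j+1]? then pvInnerA s fuel (j+1) else j

-- outer while loop over i (j = pvInnerA … i inlined), accumulating `results`; fuel = len(satz)
-- is enough because i strictly increases each iteration. Indices satz[j-1], satz[j] are in
-- range whenever read (the loop guards ensure it), so `getD` with a dummy default is exact.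
def pvOuterA (s : List Char) : Nat → Nat → List String → List String
  | 0, _, results => results
  | fuel+1, i, results =>
    if i < s.length then
      pvOuterA s fuel (pvInnerA s s.length i + 1)
        (if 2 ≤ pvInnerA s s.length i - i ∧ s.getD (pvInnerA s s.length i - 1) ' ' ∉ ['a','e','i','o','u'] then
          results ++ [String.singleton (s.getD (pvInnerA s s.length i) ' ')]
        else results)
    else results

def dreifachkonsonanten (satz : String) : List String :=
  PySem.List.sorted (pvOuterA satz.toList satz.toList.length 0 []) (fun x => x) false

-- ===== PORT B =====
-- `if run >= 3 and prev not in 'aeiou': results.append(prev)` (prev = None only when run = 0,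
-- where Python's short-circuit makes the membership test unreachable)
def pvFlushB : Option Char → Nat → List String → List String
  | some c, run, results =>
    if 3 ≤ run ∧ c ∉ ['a','e','i','o','u'] then results ++ [String.singleton c] else results
  | none, _, results => results

def pvLoopB : List Char → Option Char → Nat → List String → List String
  | [], prev, run, results => pvFlushB prev run results
  | ch :: t, prev, run, results =>
    if some ch = prev then pvLoopB t prev (run+1) results
    else pvLoopB t (some ch) 1 (pvFlushB prev run results)

def dreifachkonsonanten_alt (satz : String) : List String :=
  PySem.List.sorted (pvLoopB satz.toList none 0 []) (fun x => x) false

-- ===== PRECONDITION & SPEC =====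
def Spec_dreifachkonsonanten (satz : String) (out : List String) : Prop := out = dreifachkonsonanten_alt satz
instance (satz : String) (out : List String) : Decidable (Spec_dreifachkonsonanten satz out) := by unfold Spec_dreifachkonsonanten; infer_instance

-- ===== CLAIM (what is proved, stated in full; the proofs are below) =====
def Claim_equal_dreifachkonsonanten : Prop := ∀ (satz : String), Dom_dreifachkonsonanten satz → Spec_dreifachkonsonanten satz (dreifachkonsonanten satz)

-- ===== LEMMAS AND PROOFS =====

-- length of the leading run of `c` in `t`
def pvLead (c : Char) : List Char → Nat
  | [] => 0
  | d :: t => if d = c then pvLead c t + 1 else 0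

def pvEmit (c : Char) (n : Nat) : List String :=
  if 3 ≤ n ∧ c ∉ ['a','e','i','o','u'] then [String.singleton c] else []

-- the common run-based characterisation of both loops
def pvG : List Char → List String
  | [] => []
  | c :: t => pvEmit c (pvLead c t + 1) ++ pvG (t.drop (pvLead c t))
  termination_by l => l.length
  decreasing_by simp only [List.length_drop, List.length_cons]; omega

theorem pvG_nil : pvG [] = [] := by rw [pvG.eq_def]

theorem pvG_cons (c : Char) (t : List Char) :
    pvG (c :: t) = pvEmit c (pvLead c t + 1) ++ pvG (t.drop (pvLead c t)) := by
  rw [pvG.eq_def]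

theorem pvLead_le (c : Char) (t : List Char) : pvLead c t ≤ t.length := by
  induction t with
  | nil => simp [pvLead]
  | cons d t ih =>
    simp only [pvLead, List.length_cons]
    split <;> omega

theorem pvLead_get (c : Char) (t : List Char) : ∀ m, m < pvLead c t → t[m]? = some c := by
  induction t with
  | nil => simp [pvLead]
  | cons d t ih =>
    intro m hm
    simp only [pvLead] at hm
    by_cases hd : d = c
    · rw [if_pos hd] at hm
      cases m with
      | zero => simp [hd]
      | succ m => simpa using ih m (by omega)
    · rw [if_neg hd] at hm; omega

theorem pvRun_get (s t : List Char) (c : Char) (i : Nat) (h : s.drop i = c :: t) :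
    ∀ m, m ≤ pvLead c t → s[i + m]? = some c := by
  intro m hm
  have : (s.drop i)[m]? = s[i + m]? := by rw [List.getElem?_drop]
  rw [← this, h]
  cases m with
  | zero => simp
  | succ m =>
    simp only [List.getElem?_cons_succ]
    exact pvLead_get c t m (by omega)

theorem pvDrop_succ (s t : List Char) (c : Char) (i : Nat) (h : s.drop i = c :: t) :
    s.drop (i + 1) = t := by
  have : s.drop (i + 1) = (s.drop i).drop 1 := by
    rw [List.drop_drop]
  rw [this, h]
  simp

theorem pvInnerA_eq (s : List Char) (t : List Char) (c : Char) (i fuel : Nat)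
    (h : s.drop i = c :: t) (hf : pvLead c t ≤ fuel) :
    pvInnerA s fuel i = i + pvLead c t := by
  induction t generalizing i fuel with
  | nil =>
    have hlen : s.length - i = 1 := by
      have := List.length_drop (l := s) (i := i); rw [h] at this; simpa using this.symm
    cases fuel with
    | zero => simp [pvInnerA, pvLead]
    | succ f =>
      simp only [pvInnerA]
      rw [if_neg (by rintro ⟨h1, -⟩; omega)]
      simp [pvLead]
  | cons d t' ih =>
    have hdrop1 : s.drop (i + 1) = d :: t' := pvDrop_succ s (d :: t') c i h
    have hlen : i + 1 < s.length := by
      have := List.length_drop (l := s) (i := i + 1); rw [hdrop1] at this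
      simp at this; omega
    have hi : s[i]? = some c := by
      have := pvRun_get s (d :: t') c i h 0 (Nat.zero_le _); simpa using this
    have hi1 : s[i + 1]? = some d := by
      have : (s.drop (i+1))[0]? = s[(i+1) + 0]? := by rw [List.getElem?_drop]
      rw [hdrop1] at this; simpa using this.symm
    by_cases hdc : d = c
    · rw [show pvLead c (d :: t') = pvLead c t' + 1 by simp [pvLead, hdc]] at hf ⊢
      cases fuel with
      | zero => omega
      | succ f =>
        simp only [pvInnerA]
        rw [if_pos ⟨by omega, by rw [hi, hi1, hdc]⟩]
        rw [ih (i + 1) f (by rw [hdrop1, hdc]) (by omega)]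
        omega
    · rw [show pvLead c (d :: t') = 0 by simp [pvLead, hdc]]
      cases fuel with
      | zero => simp [pvInnerA]
      | succ f =>
        simp only [pvInnerA]
        rw [if_neg (by rintro ⟨-, h2⟩; rw [hi, hi1] at h2; exact hdc (Option.some.injEq _ _ ▸ h2).symm)]
        simp

theorem pvOuterA_eq (s : List Char) (fuel : Nat) :
    ∀ (i : Nat) (res : List String), s.length ≤ fuel + i →
      pvOuterA s fuel i res = res ++ pvG (s.drop i) := by
  induction fuel with
  | zero =>
    intro i res hle
    simp [pvOuterA, List.drop_eq_nil_of_le (by omega : s.length ≤ i), pvG_nil]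
  | succ f ih =>
    intro i res hle
    simp only [pvOuterA]
    by_cases h : i < s.length
    · rw [if_pos h]
      obtain ⟨c, t, hdrop⟩ : ∃ c t, s.drop i = c :: t := by
        cases hd : s.drop i with
        | nil =>
          have := List.length_drop (l := s) (i := i); rw [hd] at this
          simp at this; omega
        | cons c t => exact ⟨c, t, rfl⟩
      have hlead := pvLead_le c t
      have htlen : t.length + 1 = s.length - i := by
        have := List.length_drop (l := s) (i := i); rw [hdrop] at this
        simp at this; omega
      have hk := pvInnerA_eq s t c i s.length hdrop (by omega)
      have hGet : ∀ m, m ≤ pvLead c t → s.getD (i + m) ' ' = c := by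
        intro m hm
        rw [List.getD_eq_getElem?_getD, pvRun_get s t c i hdrop m hm]
        rfl
      rw [ih (pvInnerA s s.length i + 1) _ (by omega), hk]
      have hdropk : s.drop (i + pvLead c t + 1) = t.drop (pvLead c t) := by
        have h1 : s.drop (i + 1) = t := pvDrop_succ s t c i hdrop
        have : s.drop (i + pvLead c t + 1) = (s.drop (i + 1)).drop (pvLead c t) := by
          rw [List.drop_drop]; ring_nf
        rw [this, h1]
      rw [hdropk, hdrop, pvG_cons]
      by_cases h2 : 2 ≤ pvLead c t
      · have hg1 : s.getD (i + pvLead c t - 1) ' ' = c := by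
          have : i + pvLead c t - 1 = i + (pvLead c t - 1) := by omega
          rw [this]; exact hGet _ (by omega)
        have hg2 : s.getD (i + pvLead c t) ' ' = c := hGet _ (le_refl _)
        have hsub : i + pvLead c t - i = pvLead c t := by omega
        rw [hsub, hg1, hg2]
        unfold pvEmit
        by_cases hv : c ∈ ['a','e','i','o','u']
        · rw [if_neg (by simp [hv, h2]), if_neg (by simp [hv])]
          simp
        · rw [if_pos ⟨h2, hv⟩, if_pos ⟨by omega, hv⟩]
          simp
      · rw [if_neg (by rintro ⟨hc, -⟩; omega)]
        unfold pvEmit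
        rw [if_neg (by rintro ⟨hc, -⟩; omega)]
        simp
    · rw [if_neg h]
      rw [List.drop_eq_nil_of_le (by omega : s.length ≤ i), pvG_nil]
      simp

theorem pvFlushB_emit (c : Char) (r : Nat) (res : List String) :
    pvFlushB (some c) r res = res ++ pvEmit c r := by
  simp only [pvFlushB, pvEmit]
  split <;> simp

theorem pvLoopB_eq (t : List Char) (c : Char) (r : Nat) (res : List String) :
    pvLoopB t (some c) r res =
      res ++ pvEmit c (r + pvLead c t) ++ pvG (t.drop (pvLead c t)) := by
  induction t generalizing c r res with
  | nil =>
    simp only [pvLoopB, pvLead, List.drop_nil, pvG_nil]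
    rw [pvFlushB_emit]
    simp
  | cons d t' ih =>
    simp only [pvLoopB]
    by_cases hdc : d = c
    · rw [if_pos (by rw [hdc]), ih]
      simp only [pvLead, if_pos hdc, List.drop_succ_cons]
      ring_nf
    · rw [if_neg (by simpa using hdc), ih, pvFlushB_emit]
      simp only [pvLead, if_neg hdc, List.drop_zero, Nat.add_zero]
      rw [pvG_cons, Nat.add_comm 1 (pvLead d t')]
      simp [List.append_assoc]

theorem pvLoopB_G (l : List Char) : pvLoopB l none 0 [] = pvG l := by
  cases l with
  | nil => simp [pvLoopB, pvFlushB, pvG_nil]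
  | cons c t =>
    simp only [pvLoopB, if_neg (by simp : ¬(some c = none)), pvFlushB]
    rw [pvLoopB_eq, pvG_cons, Nat.add_comm 1 (pvLead c t)]
    simp

-- ===== VERDICT (by name: the statement is the Claim_ definition above) =====
theorem dreifachkonsonanten_spec : Claim_equal_dreifachkonsonanten := by
  intro satz _
  unfold Spec_dreifachkonsonanten dreifachkonsonanten dreifachkonsonanten_alt
  rw [pvOuterA_eq satz.toList satz.toList.length 0 [] (by omega), pvLoopB_G]
  simp
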